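-- pv_equiv track=rewrite | github.com/wordingone/the-search | singularity-search/anima/tests/strict_benchmark.py | _find_exact_dimensions
-- ===== SOURCE A (Python) =====
-- from typing import Dict, Any, Optional, Tuple, List
--
-- def _find_exact_dimensions(target: int, s_dim: int, o_dim: int) -> Tuple[int, int]:
--     """Find d and b that give closest to target params."""
--     best_config = (16, 8)
--     best_diff = float('inf')
--
--     for d in range(8, 64):
--         for b in range(4, d):
--             params = (
--                 s_dim * d + d +           # sense
--                 d * b + b +               # compress
--                 b * d + d +               # expand
--                 (d * 2) * d * 3 + d * 3 + # GRU
--                 d * 3 * d + d +           # interact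
--                 d * 3 * d + d +           # phi_gate
--                 d * o_dim + o_dim         # output
--             )
--             diff = abs(params - target)
--             if diff < best_diff:
--                 best_diff = diff
--                 best_config = (d, b)
--
--     return best_config
-- ===== SOURCE B (Python) =====
-- def _find_exact_dimensions(target: int, s_dim: int, o_dim: int):
--     """Find d and b that give closest to target params.
--
--     For fixed d, params = base(d) + b*(2d+1) is increasing in b, so the best b
--     is one of the two integers nearest (target - base)/(2d+1), clamped to [4, d-1].
--     """
--     best_config = (16, 8)
--     best_diff = None  # None stands for +infinity
--
--     for d in range(8, 64):
--         m = 2 * d + 1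
--         base = s_dim * d + o_dim * d + o_dim + 12 * d * d + 7 * d
--         r = target - base
--         q = r // m
--         bl = max(4, min(d - 1, q))
--         bc = max(4, min(d - 1, q + 1))
--         b = bl if abs(bl * m - r) <= abs(bc * m - r) else bc
--         diff = abs(b * m - r)
--         if best_diff is None or diff < best_diff:
--             best_diff = diff
--             best_config = (d, b)
--
--     return best_config
-- ===== Notes on version B (the rewrite author's own statement) =====
-- stated objective: faster
-- what changed: B replaces the inner scan over all b in [4,d-1] by an O(1) closed-form pick per d: since params is linear increasing in b, it computes the ideal b via floor division and compares the two clamped nearest candidates, keeping A's exact tie-breaks.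
import Mathlib
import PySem

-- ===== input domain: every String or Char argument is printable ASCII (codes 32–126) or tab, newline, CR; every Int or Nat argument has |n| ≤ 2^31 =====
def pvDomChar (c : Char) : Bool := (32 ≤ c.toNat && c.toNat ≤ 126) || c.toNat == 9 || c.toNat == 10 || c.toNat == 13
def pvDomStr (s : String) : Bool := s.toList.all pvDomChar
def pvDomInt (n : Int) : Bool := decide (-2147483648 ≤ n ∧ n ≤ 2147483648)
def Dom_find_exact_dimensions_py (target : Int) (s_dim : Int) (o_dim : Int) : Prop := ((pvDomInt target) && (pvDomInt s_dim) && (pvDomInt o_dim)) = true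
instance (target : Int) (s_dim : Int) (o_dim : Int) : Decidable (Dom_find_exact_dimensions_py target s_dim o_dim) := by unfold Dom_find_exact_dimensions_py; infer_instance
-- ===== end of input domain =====

-- B replaces A's inner scan over b by an O(1) closed-form pick per d (params is linear
-- increasing in b), keeping A's exact tie-breaking; equivalence of return values is proved.
-- A's float('inf') initial best_diff is ported as `none : Option Int` (any Int compares
-- below it), which is exact since every later comparison is Int < Int.

-- ===== PORT A =====
-- one inner-loop iteration of A ('params = …; diff = abs(params - target); if diff < best_diff: …')
def pvAStep (target s_dim o_dim d : Int) (s : (Int × Int) × Option Int) (b : Int) : (Int × Int) × Option Int :=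
  let params := s_dim * d + d + d * b + b + b * d + d + (d * 2) * d * 3 + d * 3 +
                d * 3 * d + d + d * 3 * d + d + d * o_dim + o_dim
  let diff := |params - target|
  match s.2 with
  | none => ((d, b), some diff)
  | some bd => if diff < bd then ((d, b), some diff) else s

def find_exact_dimensions_py (target : Int) (s_dim : Int) (o_dim : Int) : Int × Int :=
  ((PySem.List.pyRange 8 64 1).foldl
    (fun s d => (PySem.List.pyRange 4 d 1).foldl (pvAStep target s_dim o_dim d) s)
    ((16, 8), none)).1

-- ===== PORT B =====
-- one iteration of B's single loop over d: closed-form best b for this d, then the same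
-- strict-< running-best update as A's
def pvBStep (target s_dim o_dim : Int) (s : (Int × Int) × Option Int) (d : Int) : (Int × Int) × Option Int :=
  let m := 2 * d + 1
  let base := s_dim * d + o_dim * d + o_dim + 12 * d * d + 7 * d
  let r := target - base
  let q := PySem.Int.floordiv r m
  let bl := max 4 (min (d - 1) q)
  let bc := max 4 (min (d - 1) (q + 1))
  let b := if |bl * m - r| ≤ |bc * m - r| then bl else bc
  let diff := |b * m - r|
  match s.2 with
  | none => ((d, b), some diff)
  | some bd => if diff < bd then ((d, b), some diff) else s

def find_exact_dimensions_py_alt (target : Int) (s_dim : Int) (o_dim : Int) : Int × Int :=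
  ((PySem.List.pyRange 8 64 1).foldl (pvBStep target s_dim o_dim) ((16, 8), none)).1

-- ===== PRECONDITION & SPEC =====
def Spec_find_exact_dimensions_py (target : Int) (s_dim : Int) (o_dim : Int) (out : Int × Int) : Prop := out = find_exact_dimensions_py_alt target s_dim o_dim
instance (target : Int) (s_dim : Int) (o_dim : Int) (out : Int × Int) : Decidable (Spec_find_exact_dimensions_py target s_dim o_dim out) := by unfold Spec_find_exact_dimensions_py; infer_instance

-- ===== CLAIM (what is proved, stated in full; the proofs are below) =====
def Claim_equal_find_exact_dimensions_py : Prop := ∀ (target : Int) (s_dim : Int) (o_dim : Int), Dom_find_exact_dimensions_py target s_dim o_dim → Spec_find_exact_dimensions_py target s_dim o_dim (find_exact_dimensions_py target s_dim o_dim)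

-- ===== LEMMAS AND PROOFS =====

-- abstract running-best step: strict-< minimisation of f with config (d, b)
def pvGStep (f : Int → Int) (d : Int) (s : (Int × Int) × Option Int) (b : Int) : (Int × Int) × Option Int :=
  match s.2 with
  | none => ((d, b), some (f b))
  | some bd => if f b < bd then ((d, b), some (f b)) else s

theorem pvGStep_none (f : Int → Int) (d : Int) (cfg : Int × Int) (b : Int) :
    pvGStep f d (cfg, none) b = ((d, b), some (f b)) := rfl

theorem pvGStep_some (f : Int → Int) (d : Int) (cfg : Int × Int) (v b : Int) :
    pvGStep f d (cfg, some v) b = if f b < v then ((d, b), some (f b)) else (cfg, some v) := rfl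

-- a scan whose every element is ≥ the current best leaves the state unchanged
theorem pv_fold_keep (f : Int → Int) (d : Int) (L : List Int) (cfg : Int × Int) (v : Int)
    (h : ∀ x ∈ L, v ≤ f x) :
    L.foldl (pvGStep f d) (cfg, some v) = (cfg, some v) := by
  induction L with
  | nil => rfl
  | cons x L ih =>
    rw [List.foldl_cons, pvGStep_some, if_neg (not_lt.mpr (h x (by simp)))]
    exact ih fun y hy => h y (by simp [hy])

-- invariant: if every scanned element has f-value > c and the incoming best is > c (or none),
-- the resulting best is still > c (or none)
theorem pv_fold_gt (f : Int → Int) (d c : Int) (L : List Int) (s : (Int × Int) × Option Int)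
    (hs : ∀ v, s.2 = some v → c < v) (hL : ∀ x ∈ L, c < f x) :
    ∀ v, (L.foldl (pvGStep f d) s).2 = some v → c < v := by
  induction L generalizing s with
  | nil => exact hs
  | cons x L ih =>
    rw [List.foldl_cons]
    refine ih _ ?_ (fun y hy => hL y (by simp [hy]))
    intro v hv
    rcases s with ⟨cfg, o⟩
    cases o with
    | none =>
      rw [pvGStep_none] at hv
      simp only at hv
      injection hv with h
      exact h ▸ hL x (by simp)
    | some w =>
      rw [pvGStep_some] at hv
      by_cases hc : f x < w
      · rw [if_pos hc] at hv
        simp only at hv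
        injection hv with h
        exact h ▸ hL x (by simp)
      · rw [if_neg hc] at hv
        exact hs v hv

-- the whole scan over [lo, hi] equals a single step at the first minimiser bstar
theorem pv_inner_eq (f : Int → Int) (d lo hi bstar : Int) (hlo : lo ≤ bstar) (hhi : bstar ≤ hi)
    (h1 : ∀ x, lo ≤ x → x < bstar → f bstar < f x)
    (h2 : ∀ x, bstar < x → x ≤ hi → f bstar ≤ f x)
    (s : (Int × Int) × Option Int) :
    (PySem.List.pyRange lo (hi + 1) 1).foldl (pvGStep f d) s = pvGStep f d s bstar := by
  have hsplit : PySem.List.pyRange lo (hi + 1) 1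
      = PySem.List.pyRange lo bstar 1 ++ (bstar :: PySem.List.pyRange (bstar + 1) (hi + 1) 1) := by
    have hcons : PySem.List.pyRange bstar (hi + 1) 1
        = bstar :: PySem.List.pyRange (bstar + 1) (hi + 1) 1 :=
      PySem.List.pyRange_one_cons (by omega)
    rw [PySem.List.pyRange_one_append lo bstar (hi + 1) hlo (by omega), hcons]
  have hL1 : ∀ x ∈ PySem.List.pyRange lo bstar 1, f bstar < f x := by
    intro x hx
    obtain ⟨hx1, hx2⟩ := PySem.List.mem_pyRange_one.mp hx
    exact h1 x hx1 hx2
  have hL2 : ∀ x ∈ PySem.List.pyRange (bstar + 1) (hi + 1) 1, f bstar ≤ f x := by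
    intro x hx
    obtain ⟨hx1, hx2⟩ := PySem.List.mem_pyRange_one.mp hx
    exact h2 x (by omega) (by omega)
  rw [hsplit, List.foldl_append]
  rcases s with ⟨cfg, o⟩
  cases o with
  | none =>
    have hinv := pv_fold_gt f d (f bstar) (PySem.List.pyRange lo bstar 1) (cfg, none)
      (by simp) hL1
    rw [List.foldl_cons]
    have hstep : pvGStep f d ((PySem.List.pyRange lo bstar 1).foldl (pvGStep f d) (cfg, none)) bstar
        = ((d, bstar), some (f bstar)) := by
      rcases hres : (PySem.List.pyRange lo bstar 1).foldl (pvGStep f d) (cfg, none) with ⟨c1, o1⟩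
      cases o1 with
      | none => rfl
      | some v =>
        rw [pvGStep_some, if_pos (hinv v (by rw [hres]))]
    rw [hstep, pv_fold_keep f d _ _ _ hL2, pvGStep_none]
  | some v0 =>
    by_cases hc : f bstar < v0
    · have hinv := pv_fold_gt f d (f bstar) (PySem.List.pyRange lo bstar 1) (cfg, some v0)
        (by intro v hv; simp only at hv; injection hv with h; omega) hL1
      rw [List.foldl_cons]
      have hstep : pvGStep f d ((PySem.List.pyRange lo bstar 1).foldl (pvGStep f d) (cfg, some v0)) bstar
          = ((d, bstar), some (f bstar)) := by
        rcases hres : (PySem.List.pyRange lo bstar 1).foldl (pvGStep f d) (cfg, some v0) with ⟨c1, o1⟩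
        cases o1 with
        | none => rfl
        | some v =>
          rw [pvGStep_some, if_pos (hinv v (by rw [hres]))]
      rw [hstep, pv_fold_keep f d _ _ _ hL2, pvGStep_some, if_pos hc]
    · rw [pv_fold_keep f d _ _ _ (fun x hx => le_trans (not_lt.mp hc) (le_of_lt (hL1 x hx))),
          List.foldl_cons, pvGStep_some, if_neg hc,
          pv_fold_keep f d _ _ _ (fun x hx => le_trans (not_lt.mp hc) (hL2 x hx))]

-- arithmetic: the clamped floor/ceil candidate b is the first minimiser of |x*m - r| on [lo, hi]
theorem pv_bstar_spec (m r lo hi q bl bc b : Int) (hm : 0 < m) (hlohi : lo ≤ hi)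
    (hq : q = PySem.Int.floordiv r m)
    (hbl : bl = max lo (min hi q)) (hbc : bc = max lo (min hi (q + 1)))
    (hb : b = if |bl * m - r| ≤ |bc * m - r| then bl else bc) :
    lo ≤ b ∧ b ≤ hi ∧ (∀ x, lo ≤ x → x < b → |b * m - r| < |x * m - r|) ∧
      (∀ x, b < x → x ≤ hi → |b * m - r| ≤ |x * m - r|) := by
  have hqb : q * m ≤ r ∧ r < (q + 1) * m := (PySem.Int.floordiv_eq_iff_of_pos hm).mp hq.symm
  have fL : ∀ x y : Int, x < y → y * m ≤ r → |y * m - r| < |x * m - r| := by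
    intro x y hxy hyr
    have hxm : x * m < y * m := mul_lt_mul_of_pos_right hxy hm
    rw [abs_of_nonpos (by omega), abs_of_nonpos (by omega)]; omega
  have fR : ∀ x y : Int, x < y → r ≤ x * m → |x * m - r| < |y * m - r| := by
    intro x y hxy hxr
    have hxm : x * m < y * m := mul_lt_mul_of_pos_right hxy hm
    rw [abs_of_nonneg (by omega), abs_of_nonneg (by omega)]; omega
  by_cases hA : q + 1 ≤ lo
  · have hb' : b = lo := by rw [hb, hbl, hbc]; simp only [show max lo (min hi q) = lo by omega,
      show max lo (min hi (q + 1)) = lo by omega, le_refl, if_pos]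
    have hrlo : r ≤ lo * m :=
      le_trans (le_of_lt hqb.2) (mul_le_mul_of_nonneg_right hA (le_of_lt hm))
    refine ⟨by omega, by omega, ?_, ?_⟩
    · intro x hx1 hx2; omega
    · intro x hxb hxhi
      rw [hb'] at hxb ⊢
      exact le_of_lt (fR lo x hxb hrlo)
  · by_cases hB : hi ≤ q
    · have hb' : b = hi := by rw [hb, hbl, hbc]; simp only [show max lo (min hi q) = hi by omega,
        show max lo (min hi (q + 1)) = hi by omega, le_refl, if_pos]
      have hhir : hi * m ≤ r :=
        le_trans (mul_le_mul_of_nonneg_right hB (le_of_lt hm)) hqb.1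
      refine ⟨by omega, by omega, ?_, ?_⟩
      · intro x hx1 hx2
        rw [hb'] at hx2 ⊢
        exact fL x hi hx2 hhir
      · intro x hxb hxhi; omega
    · have hbl' : bl = q := by rw [hbl]; omega
      have hbc' : bc = q + 1 := by rw [hbc]; omega
      have hql : q * m ≤ r := hqb.1
      have hqr : r ≤ (q + 1) * m := le_of_lt hqb.2
      rw [hbl', hbc'] at hb
      by_cases hc : |q * m - r| ≤ |(q + 1) * m - r|
      · have hb' : b = q := by rw [hb, if_pos hc]
        refine ⟨by omega, by omega, ?_, ?_⟩
        · intro x hx1 hx2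
          rw [hb'] at hx2 ⊢
          exact fL x q hx2 hql
        · intro x hxb hxhi
          rw [hb'] at hxb ⊢
          rcases eq_or_lt_of_le (show q + 1 ≤ x by omega) with he | hlt
          · rw [← he]; exact hc
          · exact le_trans hc (le_of_lt (fR (q + 1) x hlt hqr))
      · have hb' : b = q + 1 := by rw [hb, if_neg hc]
        refine ⟨by omega, by omega, ?_, ?_⟩
        · intro x hx1 hx2
          rw [hb'] at hx2 ⊢
          rcases eq_or_lt_of_le (show x ≤ q by omega) with he | hlt
          · rw [he]; exact not_le.mp hc
          · exact lt_trans (not_le.mp hc) (fL x q hlt hql)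
        · intro x hxb hxhi
          rw [hb'] at hxb ⊢
          exact le_of_lt (fR (q + 1) x hxb hqr)

-- A's inner-loop step is the abstract step for f b = |b*(2d+1) - (target - base d)|
theorem pvAStep_eq_gstep (target s_dim o_dim d : Int) :
    pvAStep target s_dim o_dim d
      = pvGStep (fun b => |b * (2 * d + 1) - (target - (s_dim * d + o_dim * d + o_dim + 12 * d * d + 7 * d))|) d := by
  funext s b
  simp only [pvAStep, pvGStep]
  have he : s_dim * d + d + d * b + b + b * d + d + (d * 2) * d * 3 + d * 3 +
      d * 3 * d + d + d * 3 * d + d + d * o_dim + o_dim - target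
      = b * (2 * d + 1) - (target - (s_dim * d + o_dim * d + o_dim + 12 * d * d + 7 * d)) := by
    ring
  rw [he]

set_option maxRecDepth 8000 in
-- ===== VERDICT (by name: the statement is the Claim_ definition above) =====
theorem find_exact_dimensions_py_spec : Claim_equal_find_exact_dimensions_py := by
  intro target s_dim o_dim _hdom
  unfold Spec_find_exact_dimensions_py find_exact_dimensions_py find_exact_dimensions_py_alt
  refine congrArg Prod.fst ?_
  apply PySem.List.foldl_congr_mem
  intro s d hd
  obtain ⟨hd8, hd64⟩ := PySem.List.mem_pyRange_one.mp hd
  have hm : (0 : Int) < 2 * d + 1 := by omega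
  obtain ⟨hb1, hb2, h1, h2⟩ := pv_bstar_spec (2 * d + 1) (target - (s_dim * d + o_dim * d + o_dim + 12 * d * d + 7 * d)) 4 (d - 1)
    (PySem.Int.floordiv (target - (s_dim * d + o_dim * d + o_dim + 12 * d * d + 7 * d)) (2 * d + 1))
    (max 4 (min (d - 1) (PySem.Int.floordiv (target - (s_dim * d + o_dim * d + o_dim + 12 * d * d + 7 * d)) (2 * d + 1))))
    (max 4 (min (d - 1) (PySem.Int.floordiv (target - (s_dim * d + o_dim * d + o_dim + 12 * d * d + 7 * d)) (2 * d + 1) + 1)))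
    _ hm (by omega) rfl rfl rfl rfl
  have hrange : PySem.List.pyRange 4 d 1 = PySem.List.pyRange 4 ((d - 1) + 1) 1 := by norm_num
  rw [pvAStep_eq_gstep, hrange,
    pv_inner_eq _ d 4 (d - 1) _ hb1 hb2 h1 h2 s]
  simp only [pvBStep, pvGStep]
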